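-- pv_equiv track=rewrite | github.com/nirjharij/cracking-the-coding-interview-in-python | hard_problems/letters_numbers.py | find_delta
-- ===== SOURCE A (Python) =====
-- def find_delta(arr):
--     deltas = []
--     delta = 0
--     for i in arr:
--         if i.isdigit():
--             delta -= 1
--         else:
--             delta += 1
--         deltas.append(delta)
--     return deltas
-- ===== SOURCE B (Python) =====
-- def find_delta(arr):
--     total = sum(-1 if c.isdigit() else 1 for c in arr)
--     deltas = []
--     suffix = 0
--     for c in reversed(arr):
--         deltas.append(total - suffix)
--         suffix += -1 if c.isdigit() else 1
--     deltas.reverse()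
--     return deltas
-- ===== Notes on version B (the rewrite author's own statement) =====
-- stated objective: alternative
-- what changed: Instead of accumulating prefix sums forward, B first computes the total of all +/-1 steps and then traverses the list in reverse, deriving each entry as total minus the running suffix sum and building the output back-to-front.
import Mathlib
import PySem

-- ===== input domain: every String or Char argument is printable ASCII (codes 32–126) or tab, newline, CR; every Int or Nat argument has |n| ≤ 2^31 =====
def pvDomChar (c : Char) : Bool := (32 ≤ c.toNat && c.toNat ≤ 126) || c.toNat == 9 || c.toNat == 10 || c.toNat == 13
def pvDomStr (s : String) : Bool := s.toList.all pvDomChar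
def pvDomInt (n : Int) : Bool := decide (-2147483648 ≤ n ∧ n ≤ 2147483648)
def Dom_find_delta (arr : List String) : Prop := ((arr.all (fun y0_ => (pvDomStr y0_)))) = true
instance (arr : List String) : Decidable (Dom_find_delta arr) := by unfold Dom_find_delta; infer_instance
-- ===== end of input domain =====

-- B computes the total of all +/-1 steps first, then builds the result back-to-front from suffix sums (alternative construction, same cost).

-- ===== PORT A =====
-- A: one forward loop carrying (deltas, delta); appends the updated running delta each iteration.
def find_delta (arr : List String) : List Int :=
  (arr.foldl (fun (st : List Int × Int) i =>
      let delta := if PySem.Str.strIsdigit i then st.2 - 1 else st.2 + 1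
      (st.1 ++ [delta], delta)) ([], 0)).1

-- ===== PORT B =====
-- B: total of all steps first, then a loop over the REVERSED list carrying (deltas, suffix);
-- each entry is total - suffix; the appended list is reversed at the end (as in Source B).
def find_delta_alt (arr : List String) : List Int :=
  let total := (arr.map (fun c => if PySem.Str.strIsdigit c then (-1 : Int) else 1)).sum
  (arr.reverse.foldl (fun (st : List Int × Int) c =>
      (st.1 ++ [total - st.2],
       st.2 + (if PySem.Str.strIsdigit c then (-1 : Int) else 1))) ([], 0)).1.reverse

-- ===== PRECONDITION & SPEC =====
def Spec_find_delta (arr : List String) (out : List Int) : Prop := out = find_delta_alt arr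
instance (arr : List String) (out : List Int) : Decidable (Spec_find_delta arr out) := by unfold Spec_find_delta; infer_instance

-- ===== CLAIM (what is proved, stated in full; the proofs are below) =====
def Claim_equal_find_delta : Prop := ∀ (arr : List String), Dom_find_delta arr → Spec_find_delta arr (find_delta arr)

-- ===== LEMMAS AND PROOFS =====
-- Reference: running prefix sums of a step list starting from acc.
def pyAccumulate (acc : Int) : List Int → List Int
  | [] => []
  | x :: xs => (acc + x) :: pyAccumulate (acc + x) xs

theorem pyAccumulate_append (a : Int) (l1 l2 : List Int) :
    pyAccumulate a (l1 ++ l2) = pyAccumulate a l1 ++ pyAccumulate (a + l1.sum) l2 := by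
  induction l1 generalizing a with
  | nil => simp [pyAccumulate]
  | cons x t ih => simp [pyAccumulate, ih, add_assoc]

-- A's loop produces exactly the prefix sums.
theorem find_delta_loop_inv (arr : List String) (deltas : List Int) (delta : Int) :
    (arr.foldl (fun (st : List Int × Int) i =>
        let d := if PySem.Str.strIsdigit i then st.2 - 1 else st.2 + 1
        (st.1 ++ [d], d)) (deltas, delta)).1 =
      deltas ++ pyAccumulate delta (arr.map (fun c => if PySem.Str.strIsdigit c then (-1 : Int) else 1)) := by
  induction arr generalizing deltas delta with
  | nil => simp [pyAccumulate]
  | cons h t ih =>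
      simp only [List.foldl_cons, List.map_cons, pyAccumulate]
      rw [ih]
      split <;> simp [sub_eq_add_neg]

-- B's reverse loop over step list r, reversed at the end, also yields prefix sums.
theorem alt_loop_inv (total suff : Int) (out : List Int) (r : List Int) :
    ((r.foldl (fun (st : List Int × Int) x =>
        (st.1 ++ [total - st.2], st.2 + x)) (out, suff)).1).reverse =
      pyAccumulate (total - suff - r.sum) r.reverse ++ out.reverse := by
  induction r generalizing out suff with
  | nil => simp [pyAccumulate]
  | cons x t ih =>
      simp only [List.foldl_cons, List.reverse_cons, List.sum_cons]
      rw [ih, pyAccumulate_append]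
      simp [pyAccumulate]
      have h1 : total - (suff + x) - t.sum = total - suff - (x + t.sum) := by ring
      have h2 : total - suff = total - suff - (x + t.sum) + t.sum + x := by ring
      rw [h1, ← h2]

-- ===== VERDICT (by name: the statement is the Claim_ definition above) =====
theorem find_delta_spec : Claim_equal_find_delta := by
  intro arr _
  unfold Spec_find_delta find_delta find_delta_alt
  rw [find_delta_loop_inv]
  have hB := alt_loop_inv
      ((arr.map (fun c => if PySem.Str.strIsdigit c then (-1 : Int) else 1)).sum) 0 []
      (arr.reverse.map (fun c => if PySem.Str.strIsdigit c then (-1 : Int) else 1))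
  simp only [List.foldl_map] at hB
  simp only []
  rw [hB]
  simp [List.map_reverse]
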